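-- pv_equiv track=rewrite | github.com/mohit-negi/black_box | strings/duval.py | duval
-- ===== SOURCE A (Python) =====
-- def duval(n, s):
--     '''
--     params:
--      'n' - length of the string
--      's' - string itself
--      returns the 0-indexed position of the lexicographically smallest cyclic shift of the string.
--     '''
--     assert n >= 1
--     i = 0
--     ans = 0
--     while i < n:
--         ans = i
--         j = i + 1
--         k = i
--         while j < n + n and not s[j % n] < s[k % n]:
--             if s[k % n] < s[j % n]:
--                 k = i
--             else:
--                 k += 1
--             j += 1
--         while i <= k:
--             i += j - k
--     return ans
-- ===== SOURCE B (Python) =====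
-- def duval(n, s):
--     assert n >= 1
--     return min(range(n), key=lambda i: [s[(i + t) % n] for t in range(n)])
-- ===== Notes on version B (the rewrite author's own statement) =====
-- stated objective: simpler
-- what changed: Replaced the incremental Duval/Booth two-pointer scan over the doubled string by a direct one-liner that takes the min over all n rotations compared lexicographically (first index wins ties), with modular indexing so only s[0:n] is touched.
import Mathlib
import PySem

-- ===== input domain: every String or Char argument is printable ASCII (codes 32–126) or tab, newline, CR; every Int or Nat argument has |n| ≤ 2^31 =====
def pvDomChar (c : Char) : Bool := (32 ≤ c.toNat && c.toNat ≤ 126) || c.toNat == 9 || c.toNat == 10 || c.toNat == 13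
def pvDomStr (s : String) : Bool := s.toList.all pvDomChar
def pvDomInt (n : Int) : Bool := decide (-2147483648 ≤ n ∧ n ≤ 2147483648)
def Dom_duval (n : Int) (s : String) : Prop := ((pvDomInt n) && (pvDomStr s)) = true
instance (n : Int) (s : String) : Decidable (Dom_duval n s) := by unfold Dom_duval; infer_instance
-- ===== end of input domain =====

-- B replaces the incremental Duval/Booth scan by a direct minimum over all n rotations
-- (lexicographic comparison, first index on ties); simpler, not faster.

-- ===== PORT A =====
-- s[x % n]; the index is in range on every access under Pre_duval
def duvalGet (l : List Char) (nn x : Nat) : Char := l.getD (x % nn) default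

-- inner while loop: `while j < n + n and not s[j % n] < s[k % n]: ...`
def duvalInnerGo (g : Nat → Char) (nn i j k : Nat) : Nat × Nat :=
  if h : j < nn + nn ∧ ¬ (g j < g k) then
    if g k < g j then duvalInnerGo g nn i (j + 1) i
    else duvalInnerGo g nn i (j + 1) (k + 1)
  else (j, k)
termination_by nn + nn - j
decreasing_by all_goals omega

-- `while i <= k: i += j - k` (the `k < j` test is only a totality guard; Python's
-- loop state always has k < j, proved in duvalSkip_eq below)
def duvalSkip (i j k : Nat) : Nat :=
  if _h : i ≤ k then
    if _h2 : k < j then duvalSkip (i + (j - k)) j k else i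
  else i
termination_by k + 1 - i
decreasing_by omega

-- outer while loop; `ans = i` at the top of each iteration is the `ans` argument of the
-- recursive call (the `i < i'` test is only a totality guard: i always strictly increases)
def duvalOuterGo (g : Nat → Char) (nn i ans : Nat) : Nat :=
  if h : i < nn then
    if h2 : i < duvalSkip i (duvalInnerGo g nn i (i + 1) i).1 (duvalInnerGo g nn i (i + 1) i).2 then
      duvalOuterGo g nn (duvalSkip i (duvalInnerGo g nn i (i + 1) i).1 (duvalInnerGo g nn i (i + 1) i).2) i
    else i
  else ans
termination_by nn - i
decreasing_by omega

def duval (n : Int) (s : String) : Int :=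
  if 1 ≤ n then
    (duvalOuterGo (fun x => duvalGet s.toList n.toNat x) n.toNat 0 0 : Int)
  else 0  -- `assert n >= 1` fails: Python raises (outside Pre_duval)

-- ===== PORT B =====
-- Python list-of-characters lexicographic `<`
def lexLt : List Char → List Char → Bool
  | _, [] => false
  | [], _ :: _ => true
  | a :: as, b :: bs => a < b || (a == b && lexLt as bs)

-- the key of rotation i: [s[(i + t) % n] for t in range(n)]
def duvalKey (l : List Char) (nn i : Nat) : List Char :=
  (List.range nn).map (fun t => duvalGet l nn (i + t))

-- min(range(n), key=...): first element is the initial best, the rest is a left fold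
def duvalMin (l : List Char) (nn : Nat) : Nat :=
  List.foldl (fun m c => if lexLt (duvalKey l nn c) (duvalKey l nn m) then c else m) 0
    (List.range' 1 (nn - 1))

def duval_alt (n : Int) (s : String) : Int :=
  if 1 ≤ n then (duvalMin s.toList n.toNat : Int) else 0

-- ===== PRECONDITION & SPEC =====
-- A raises AssertionError when n < 1 and IndexError (an access past the end of s) whenever
-- n exceeds len(s); Pre_ excludes exactly those raising inputs.
def Pre_duval (n : Int) (s : String) : Prop := 1 ≤ n ∧ n ≤ (s.toList.length : Int)
instance (n : Int) (s : String) : Decidable (Pre_duval n s) := by unfold Pre_duval; infer_instance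

def pvWitness_duval : Int × String := (3, "cba")

def Spec_duval (n : Int) (s : String) (out : Int) : Prop := out = duval_alt n s
instance (n : Int) (s : String) (out : Int) : Decidable (Spec_duval n s out) := by unfold Spec_duval; infer_instance

-- ===== CLAIM (what is proved, stated in full; the proofs are below) =====
def Claim_equal_duval : Prop := ∀ (n : Int) (s : String), Dom_duval n s → Pre_duval n s → Spec_duval n s (duval n s)

-- ===== LEMMAS AND PROOFS =====

-- ---- generic facts about lexLt ----
theorem lexLt_irrefl : ∀ xs : List Char, lexLt xs xs = false := by
  intro xs; induction xs with
  | nil => rfl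
  | cons a as ih => simp [lexLt, ih]

theorem lexLt_trans : ∀ xs ys zs : List Char,
    lexLt xs ys = true → lexLt ys zs = true → lexLt xs zs = true := by
  intro xs
  induction xs with
  | nil =>
    intro ys zs h1 h2
    cases ys with
    | nil => simp [lexLt] at h1
    | cons b bs =>
      cases zs with
      | nil => simp [lexLt] at h2
      | cons c cs => simp [lexLt]
  | cons a as ih =>
    intro ys zs h1 h2
    cases ys with
    | nil => simp [lexLt] at h1
    | cons b bs =>
      cases zs with
      | nil => simp [lexLt] at h2
      | cons c cs =>
        simp only [lexLt, Bool.or_eq_true, Bool.and_eq_true, beq_iff_eq,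
          decide_eq_true_eq] at h1 h2 ⊢
        rcases h1 with h1 | ⟨rfl, h1⟩
        · rcases h2 with h2 | ⟨rfl, h2⟩
          · exact Or.inl (lt_trans h1 h2)
          · exact Or.inl h1
        · rcases h2 with h2 | ⟨rfl, h2⟩
          · exact Or.inl h2
          · exact Or.inr ⟨rfl, ih _ _ h1 h2⟩

theorem lexLt_asymm {xs ys : List Char} (h : lexLt xs ys = true) : lexLt ys xs = false := by
  by_contra hc
  have := lexLt_trans xs ys xs h (by revert hc; cases lexLt ys xs <;> simp)
  rw [lexLt_irrefl] at this; exact absurd this (by simp)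

theorem lexLt_connex : ∀ xs ys : List Char, xs.length = ys.length →
    lexLt xs ys = false → lexLt ys xs = false → xs = ys := by
  intro xs
  induction xs with
  | nil => intro ys h _ _; cases ys with
    | nil => rfl
    | cons b bs => simp at h
  | cons a as ih =>
    intro ys hlen h1 h2
    cases ys with
    | nil => simp at hlen
    | cons b bs =>
      simp only [lexLt, Bool.or_eq_false_iff, Bool.and_eq_false_iff,
        decide_eq_false_iff_not] at h1 h2
      have hab : a = b := le_antisymm (not_lt.mp h2.1) (not_lt.mp h1.1)
      subst hab
      have h1' : lexLt as bs = false := by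
        rcases h1.2 with h | h
        · simp at h
        · exact h
      have h2' : lexLt bs as = false := by
        rcases h2.2 with h | h
        · simp at h
        · exact h
      simp only [List.length_cons, Nat.add_right_cancel_iff] at hlen
      rw [ih bs hlen h1' h2']

-- first strict difference inside the windows ⇒ lexLt on mapped ranges
theorem lexLt_range_of_diff : ∀ (t : Nat) (f h : Nat → Char) (m : Nat), t < m →
    (∀ u, u < t → f u = h u) → f t < h t →
    lexLt ((List.range m).map f) ((List.range m).map h) = true := by
  intro t
  induction t with
  | zero =>
    intro f h m hm _ hlt
    obtain ⟨m', rfl⟩ := Nat.exists_eq_succ_of_ne_zero (by omega : m ≠ 0)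
    simp [List.range_succ_eq_map, lexLt, hlt]
  | succ t ih =>
    intro f h m hm heq hlt
    obtain ⟨m', rfl⟩ := Nat.exists_eq_succ_of_ne_zero (by omega : m ≠ 0)
    have h0 : f 0 = h 0 := heq 0 (by omega)
    have htail := ih (fun u => f (u + 1)) (fun u => h (u + 1)) m' (by omega)
      (fun u hu => heq (u + 1) (by omega)) hlt
    simp only [List.range_succ_eq_map, List.map_cons, List.map_map, lexLt, h0, lt_irrefl]
    simpa [Function.comp, Nat.succ_eq_add_one] using htail

-- ---- windows of length nn of a periodic g ----
def win (g : Nat → Char) (nn a : Nat) : List Char := (List.range nn).map (fun t => g (a + t))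

theorem win_eq_of_agree {g : Nat → Char} {nn a b : Nat}
    (h : ∀ t, t < nn → g (a + t) = g (b + t)) : win g nn a = win g nn b := by
  unfold win
  apply List.map_congr_left
  intro t ht
  exact h t (List.mem_range.mp ht)

theorem agree_all {g : Nat → Char} {nn a b : Nat} (hper : ∀ x, g (x + nn) = g x)
    (hnn : 0 < nn) (h : ∀ u, u < nn → g (a + u) = g (b + u)) : ∀ t, g (a + t) = g (b + t) := by
  intro t
  induction t using Nat.strong_induction_on with
  | _ t ih =>
    by_cases ht : t < nn
    · exact h t ht
    · have ha : a + t = (a + (t - nn)) + nn := by omega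
      have hb : b + t = (b + (t - nn)) + nn := by omega
      rw [ha, hb, hper, hper]
      exact ih (t - nn) (by omega)

-- pointwise first strict difference (at ANY position) ⇒ lexLt of the windows
theorem win_lt_of_diff {g : Nat → Char} {nn a b t : Nat} (hper : ∀ x, g (x + nn) = g x)
    (hnn : 0 < nn) (heq : ∀ u, u < t → g (a + u) = g (b + u)) (hlt : g (a + t) < g (b + t)) :
    lexLt (win g nn a) (win g nn b) = true := by
  by_cases ht : t < nn
  · exact lexLt_range_of_diff t _ _ nn ht heq hlt
  · exfalso
    have := agree_all hper hnn (fun u hu => heq u (by omega)) t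
    exact absurd this (ne_of_lt hlt)

-- ===== the inner-loop invariant =====
-- p = j - k; g is p-periodic on [i+p, j) and the period word g[i..i+p) is strictly smaller
-- than each of its proper suffixes, with the strict difference inside the suffix (Lyndon).
def InnerInv (g : Nat → Char) (i j k : Nat) : Prop :=
  i ≤ k ∧ k < j ∧
  (∀ x, i + (j - k) ≤ x → x < j → g x = g (x - (j - k))) ∧
  (∀ d, 0 < d → d < j - k →
    ∃ t, d + t < j - k ∧ (∀ u, u < t → g (i + u) = g (i + d + u)) ∧ g (i + t) < g (i + d + t))

theorem A1mod {g : Nat → Char} {i j k : Nat} (hinv : InnerInv g i j k) :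
    ∀ x, i ≤ x → x < j → g x = g (i + ((x - i) % (j - k))) := by
  obtain ⟨hik, hkj, hA1, _⟩ := hinv
  set p := j - k with hp
  have hp0 : 0 < p := by omega
  intro x
  induction x using Nat.strong_induction_on with
  | _ x ih =>
    intro hix hxj
    by_cases hxp : x - i < p
    · rw [Nat.mod_eq_of_lt hxp]; congr 1; omega
    · have h1 : g x = g (x - p) := hA1 x (by omega) hxj
      rw [h1, ih (x - p) (by omega) (by omega) (by omega)]
      congr 2
      have : x - i = (x - p - i) + p := by omega
      rw [this, Nat.add_mod_right]

theorem inner_init (g : Nat → Char) (i : Nat) : InnerInv g i (i + 1) i := by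
  refine ⟨le_refl i, by omega, ?_, ?_⟩
  · intro x hx1 hx2; omega
  · intro d hd1 hd2; omega

theorem inner_step_eq {g : Nat → Char} {i j k : Nat} (hinv : InnerInv g i j k)
    (heq : g j = g k) : InnerInv g i (j + 1) (k + 1) := by
  obtain ⟨hik, hkj, hA1, hLY⟩ := hinv
  have hp : j + 1 - (k + 1) = j - k := by omega
  refine ⟨by omega, by omega, ?_, ?_⟩
  · intro x hx1 hx2
    rw [hp] at hx1 ⊢
    by_cases hxj : x < j
    · exact hA1 x hx1 hxj
    · have hxe : x = j := by omega
      rw [hxe, show j - (j - k) = k by omega, heq]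
  · rw [hp]; exact hLY

theorem pvModSubMul (a m p : Nat) (h : m * p ≤ a) : (a - m * p) % p = a % p := by
  have ha : a = (a - m * p) + m * p := by omega
  conv_rhs => rw [ha]
  rw [Nat.add_mul_mod_self_right]

theorem inner_step_reset {g : Nat → Char} {i j k : Nat} (hinv : InnerInv g i j k)
    (hlt : g k < g j) : InnerInv g i (j + 1) i := by
  obtain ⟨hik, hkj, hA1, hLY⟩ := hinv
  have hmod := A1mod ⟨hik, hkj, hA1, hLY⟩
  obtain ⟨p, hp⟩ : ∃ p, p = j - k := ⟨_, rfl⟩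
  rw [← hp] at hmod hLY
  have hp0 : 0 < p := by omega
  have hpji : p ≤ j - i := by omega
  have hgk : g k = g (i + (j - i) % p) := by
    rw [hmod k (by omega) (by omega)]
    congr 2
    rw [show k - i = (j - i) - 1 * p by omega, pvModSubMul (j - i) 1 p (by omega)]
  refine ⟨le_refl i, by omega, ?_, ?_⟩
  · intro x hx1 hx2; omega
  · intro d hd0 hdp'
    have hdji : d ≤ j - i := by omega
    have hsplit : d / p * p + d % p = d := Nat.div_add_mod' d p
    have hdd_lt : d % p < p := Nat.mod_lt _ hp0
    by_cases hdd0 : d % p = 0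
    · -- d is a multiple of p: difference appears at the freshly read character g j
      have hd_p : p ≤ d := by
        rcases Nat.eq_zero_or_pos (d / p) with hm0 | hm0
        · rw [hm0] at hsplit
          simp at hsplit
          omega
        · calc p ≤ d / p * p := Nat.le_mul_of_pos_left p hm0
            _ ≤ d := by omega
      refine ⟨j - i - d, by omega, ?_, ?_⟩
      · intro u hu
        rw [hmod (i + u) (by omega) (by omega), hmod (i + d + u) (by omega) (by omega)]
        congr 2
        rw [show i + u - i = u by omega, show i + d + u - i = u + d / p * p by omega,
          Nat.add_mul_mod_self_right]
      · rw [show i + d + (j - i - d) = j by omega,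
          hmod (i + (j - i - d)) (by omega) (by omega),
          show i + (j - i - d) - i = (j - i) - d / p * p by omega,
          pvModSubMul (j - i) (d / p) p (by omega), ← hgk]
        exact hlt
    · -- d = (d/p)*p + d%p with 0 < d%p < p: use the Lyndon property of w at offset d%p
      obtain ⟨t0, ht0p, ht0eq, ht0lt⟩ := hLY (d % p) (by omega) hdd_lt
      have hredu : ∀ u, d % p + u < p → i + d + u < j → g (i + d + u) = g (i + (d % p + u)) := by
        intro u h1 h2
        rw [hmod (i + d + u) (by omega) h2]
        congr 2
        rw [show i + d + u - i = (d % p + u) + d / p * p by omega, Nat.add_mul_mod_self_right,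
          Nat.mod_eq_of_lt h1]
      by_cases hcase : t0 < j - i - d
      · refine ⟨t0, by omega, ?_, ?_⟩
        · intro u hu
          rw [ht0eq u hu, show i + d % p + u = i + (d % p + u) by ring,
            ← hredu u (by omega) (by omega)]
        · rw [hredu t0 (by omega) (by omega)]
          rw [show i + (d % p + t0) = i + d % p + t0 by ring]
          exact ht0lt
      · -- j - i - d ≤ t0
        refine ⟨j - i - d, by omega, ?_, ?_⟩
        · intro u hu
          rw [ht0eq u (by omega), show i + d % p + u = i + (d % p + u) by ring,
            ← hredu u (by omega) (by omega)]
        · rw [show i + d + (j - i - d) = j by omega]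
          have hv : d % p + (j - i - d) = (j - i) % p := by
            have h2 : (d % p + (j - i - d)) % p = (j - i) % p := by
              rw [show d % p + (j - i - d) = (j - i) - d / p * p by omega,
                pvModSubMul (j - i) (d / p) p (by omega)]
            have h3 : d % p + (j - i - d) < p := by omega
            rw [← h2, Nat.mod_eq_of_lt h3]
          rcases eq_or_lt_of_le (Nat.le_of_not_lt hcase) with heq2 | hlt2
          · have h3 := ht0lt
            rw [← heq2] at h3
            calc g (i + (j - i - d)) < g (i + d % p + (j - i - d)) := h3
              _ = g (i + (j - i) % p) := by
                  rw [show i + d % p + (j - i - d) = i + (d % p + (j - i - d)) by ring, hv]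
              _ = g k := hgk.symm
              _ < g j := hlt
          · calc g (i + (j - i - d)) = g (i + d % p + (j - i - d)) := ht0eq _ hlt2
              _ = g (i + (j - i) % p) := by
                  rw [show i + d % p + (j - i - d) = i + (d % p + (j - i - d)) by ring, hv]
              _ = g k := hgk.symm
              _ < g j := hlt

-- ---- the inner loop runs to an exit state that still satisfies the invariant ----
theorem innerGo_spec (g : Nat → Char) (nn i : Nat) :
    ∀ fuel j k, nn + nn - j ≤ fuel → InnerInv g i j k → j ≤ nn + nn →
    InnerInv g i (duvalInnerGo g nn i j k).1 (duvalInnerGo g nn i j k).2 ∧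
    (duvalInnerGo g nn i j k).1 ≤ nn + nn ∧
    ((duvalInnerGo g nn i j k).1 = nn + nn ∨
      g (duvalInnerGo g nn i j k).1 < g (duvalInnerGo g nn i j k).2) := by
  intro fuel
  induction fuel with
  | zero =>
    intro j k hf hinv hj
    have hj2 : j = nn + nn := by omega
    rw [duvalInnerGo, dif_neg (by omega)]
    exact ⟨hinv, by omega, Or.inl hj2⟩
  | succ fuel ih =>
    intro j k hf hinv hj
    rw [duvalInnerGo]
    by_cases hcond : j < nn + nn ∧ ¬ g j < g k
    · rw [dif_pos hcond]
      by_cases hgj : g k < g j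
      · rw [if_pos hgj]
        exact ih (j + 1) i (by omega) (inner_step_reset hinv hgj) (by omega)
      · rw [if_neg hgj]
        have heq : g j = g k := le_antisymm (not_lt.mp hgj) (not_lt.mp hcond.2)
        exact ih (j + 1) (k + 1) (by omega) (inner_step_eq hinv heq) (by omega)
    · rw [dif_neg hcond]
      refine ⟨hinv, hj, ?_⟩
      by_cases hjlt : j < nn + nn
      · refine Or.inr ?_
        by_contra hno
        exact hcond ⟨hjlt, hno⟩
      · exact Or.inl (by omega)

-- ---- `while i <= k: i += j - k` in closed form ----
theorem duvalSkip_eq : ∀ fuel i j k, k + 1 - i ≤ fuel → i ≤ k → k < j →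
    duvalSkip i j k = i + ((k - i) / (j - k) + 1) * (j - k) := by
  intro fuel
  induction fuel with
  | zero => intro i j k hf hik hkj; omega
  | succ fuel ih =>
    intro i j k hf hik hkj
    rw [duvalSkip, dif_pos hik, dif_pos hkj]
    by_cases h2 : i + (j - k) ≤ k
    · rw [ih (i + (j - k)) j k (by omega) h2 hkj]
      have hdiv : (k - i) / (j - k) = (k - (i + (j - k))) / (j - k) + 1 := by
        rw [← Nat.add_div_right _ (by omega : 0 < j - k)]
        congr 1
        omega
      rw [hdiv]
      ring
    · rw [duvalSkip, dif_neg h2]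
      have hdiv : (k - i) / (j - k) = 0 := Nat.div_eq_of_lt (by omega)
      rw [hdiv]
      ring

-- ---- facts available at inner-loop exit ----
-- every skipped start at a NON-multiple of the period is strictly above the base i
theorem exit_nonmult {g : Nat → Char} {nn i j k : Nat} (hper : ∀ x, g (x + nn) = g x)
    (hnn : 0 < nn) (hinv : InnerInv g i j k) :
    ∀ a, i < a → a - i < (j - i) / (j - k) * (j - k) → (a - i) % (j - k) ≠ 0 →
    lexLt (win g nn i) (win g nn a) = true := by
  intro a hia hae hmod0
  obtain ⟨hik, hkj, hA1, hLY⟩ := hinv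
  have hmod := A1mod ⟨hik, hkj, hA1, hLY⟩
  obtain ⟨p, hp⟩ : ∃ p, p = j - k := ⟨_, rfl⟩
  rw [← hp] at hmod hLY hae hmod0
  have hp0 : 0 < p := by omega
  have hsplit : (a - i) / p * p + (a - i) % p = a - i := Nat.div_add_mod' (a - i) p
  have hddlt : (a - i) % p < p := Nat.mod_lt _ hp0
  have hep : (j - i) / p * p ≤ j - i := Nat.div_mul_le_self (j - i) p
  obtain ⟨t0, ht0p, ht0eq, ht0lt⟩ := hLY ((a - i) % p) (by omega) hddlt
  -- a + u < j for u ≤ t0: a + u < i + ((a-i)/p + 1)*p ≤ i + (j-i)/p*p ≤ j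
  have hstep : (a - i) / p * p + p ≤ (j - i) / p * p := by
    have h1 : (a - i) / p < (j - i) / p := by
      by_contra hby
      push_neg at hby
      have := Nat.mul_le_mul_right p hby
      omega
    calc (a - i) / p * p + p = ((a - i) / p + 1) * p := by ring
      _ ≤ (j - i) / p * p := Nat.mul_le_mul_right p (by omega)
  have hred : ∀ u, u ≤ t0 → g (a + u) = g (i + ((a - i) % p + u)) := by
    intro u hu
    rw [hmod (a + u) (by omega) (by omega)]
    congr 2
    rw [show a + u - i = ((a - i) % p + u) + (a - i) / p * p by omega,
      Nat.add_mul_mod_self_right, Nat.mod_eq_of_lt (by omega)]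
  apply win_lt_of_diff hper hnn (t := t0)
  · intro u hu
    rw [hred u (by omega), ht0eq u hu]
    congr 1
    ring
  · rw [hred t0 (le_refl t0), show i + ((a - i) % p + t0) = i + (a - i) % p + t0 by ring]
    exact ht0lt

-- on a comparison exit, each complete period start (including i itself) is strictly
-- above the final skipped position i + e*p
theorem exit_mult {g : Nat → Char} {nn i j k : Nat} (hper : ∀ x, g (x + nn) = g x)
    (hnn : 0 < nn) (hinv : InnerInv g i j k) (hgj : g j < g k) :
    ∀ m, m < (j - i) / (j - k) →
    lexLt (win g nn (i + (j - i) / (j - k) * (j - k))) (win g nn (i + m * (j - k))) = true := by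
  intro m hm
  obtain ⟨hik, hkj, hA1, hLY⟩ := hinv
  have hmod := A1mod ⟨hik, hkj, hA1, hLY⟩
  obtain ⟨p, hp⟩ : ∃ p, p = j - k := ⟨_, rfl⟩
  rw [← hp] at hmod hm ⊢
  have hp0 : 0 < p := by omega
  have hsplit : (j - i) / p * p + (j - i) % p = j - i := Nat.div_add_mod' (j - i) p
  have hrp : (j - i) % p < p := Nat.mod_lt _ hp0
  have hij : i ≤ j := by omega
  have hiej : i + (j - i) / p * p + (j - i) % p = j := by omega
  have hmp : m * p + p ≤ (j - i) / p * p := by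
    calc m * p + p = (m + 1) * p := by ring
      _ ≤ (j - i) / p * p := Nat.mul_le_mul_right p (by omega)
  have hgk : g k = g (i + (j - i) % p) := by
    rw [hmod k (by omega) (by omega)]
    congr 2
    rw [show k - i = (j - i) - 1 * p by omega, pvModSubMul (j - i) 1 p (by omega)]
  apply win_lt_of_diff hper hnn (t := (j - i) % p)
  · intro u hu
    rw [hmod (i + (j - i) / p * p + u) (by omega) (by omega),
      hmod (i + m * p + u) (by omega) (by omega)]
    congr 2
    rw [show i + (j - i) / p * p + u - i = u + (j - i) / p * p by omega,
      Nat.add_mul_mod_self_right,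
      show i + m * p + u - i = u + m * p by omega, Nat.add_mul_mod_self_right]
  · rw [show i + (j - i) / p * p + (j - i) % p = j from hiej]
    rw [hmod (i + m * p + (j - i) % p) (by omega) (by omega)]
    rw [show i + m * p + (j - i) % p - i = (j - i) % p + m * p by omega,
      Nat.add_mul_mod_self_right, Nat.mod_eq_of_lt hrp, ← hgk]
    exact hgj

-- on a 2n exit, every period-multiple start whose window is fully scanned ties with i
theorem exit_eqmult {g : Nat → Char} {nn i j k : Nat} (hinv : InnerInv g i j k) :
    ∀ m b, b = i + m * (j - k) → b + nn ≤ j → win g nn i = win g nn b := by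
  intro m b hb hbn
  obtain ⟨hik, hkj, hA1, hLY⟩ := hinv
  have hmod := A1mod ⟨hik, hkj, hA1, hLY⟩
  obtain ⟨p, hp⟩ : ∃ p, p = j - k := ⟨_, rfl⟩
  rw [← hp] at hmod hb
  have hp0 : 0 < p := by omega
  apply win_eq_of_agree
  intro t ht
  rw [hmod (i + t) (by omega) (by omega), hmod (b + t) (by omega) (by omega)]
  congr 2
  rw [show i + t - i = t by omega, show b + t - i = t + m * p by omega,
    Nat.add_mul_mod_self_right]

-- ---- what the whole outer loop returns ----
def Final (g : Nat → Char) (nn m : Nat) : Prop :=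
  m < nn ∧ (∀ b, b < m → lexLt (win g nn m) (win g nn b) = true) ∧
    (∀ b, m ≤ b → b < nn → lexLt (win g nn b) (win g nn m) = false)

theorem outer_spec (g : Nat → Char) (nn : Nat) (hper : ∀ x, g (x + nn) = g x) (hnn : 0 < nn) :
    ∀ fuel i ans, nn - i ≤ fuel → i < nn →
    (∀ b, b < i → lexLt (win g nn i) (win g nn b) = true) →
    Final g nn (duvalOuterGo g nn i ans) := by
  intro fuel
  induction fuel with
  | zero => intro i ans hf hi _; omega
  | succ fuel ih =>
    intro i ans hf hi hOI
    rw [duvalOuterGo, dif_pos hi]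
    have hspec := innerGo_spec g nn i (nn + nn) (i + 1) i (by omega) (inner_init g i) (by omega)
    obtain ⟨hinv, hj2n, hexit⟩ := hspec
    obtain ⟨j, k, hJK⟩ : ∃ j k, duvalInnerGo g nn i (i + 1) i = (j, k) :=
      ⟨_, _, rfl⟩
    rw [hJK] at hinv hj2n hexit ⊢
    simp only at hinv hj2n hexit ⊢
    obtain ⟨hik, hkj, hA1, hLY⟩ := hinv
    have hinv : InnerInv g i j k := ⟨hik, hkj, hA1, hLY⟩
    have hp0 : 0 < j - k := by omega
    have hsplit : (j - i) / (j - k) * (j - k) + (j - i) % (j - k) = j - i :=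
      Nat.div_add_mod' (j - i) (j - k)
    have hrp : (j - i) % (j - k) < j - k := Nat.mod_lt _ hp0
    have he : 1 ≤ (j - i) / (j - k) := (Nat.one_le_div_iff hp0).mpr (by omega)
    have hep1 : j - k ≤ (j - i) / (j - k) * (j - k) := by
      calc j - k = 1 * (j - k) := by ring
        _ ≤ (j - i) / (j - k) * (j - k) := Nat.mul_le_mul_right _ he
    have hskip : duvalSkip i j k = i + (j - i) / (j - k) * (j - k) := by
      rw [duvalSkip_eq (k + 1 - i) i j k (le_refl _) hik hkj]
      congr 2
      rw [show j - i = (k - i) + (j - k) by omega, Nat.add_div_right _ hp0]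
    rw [hskip]
    have hii' : i < i + (j - i) / (j - k) * (j - k) := by omega
    rw [dif_pos hii']
    by_cases hgjk : g j < g k
    · -- comparison exit: the loop continues from i' = i + e*p, still < nn
      have hOI' : ∀ b, b < i + (j - i) / (j - k) * (j - k) →
          lexLt (win g nn (i + (j - i) / (j - k) * (j - k))) (win g nn b) = true := by
        have hI'I : lexLt (win g nn (i + (j - i) / (j - k) * (j - k))) (win g nn i) = true := by
          have := exit_mult hper hnn hinv hgjk 0 he
          rw [show i + 0 * (j - k) = i by ring] at this
          exact this
        intro b hb
        rcases lt_trichotomy b i with hbi | rfl | hib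
        · exact lexLt_trans _ _ _ hI'I (hOI b hbi)
        · exact hI'I
        · by_cases hd : (b - i) % (j - k) = 0
          · have hx : (b - i) / (j - k) * (j - k) + (b - i) % (j - k) = b - i :=
              Nat.div_add_mod' (b - i) (j - k)
            have hmlt : (b - i) / (j - k) < (j - i) / (j - k) := by
              by_contra hby
              push_neg at hby
              have := Nat.mul_le_mul_right (j - k) hby
              omega
            have := exit_mult hper hnn hinv hgjk ((b - i) / (j - k)) hmlt
            rw [show i + (b - i) / (j - k) * (j - k) = b by omega] at this
            exact this
          · exact lexLt_trans _ _ _ hI'I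
              (exit_nonmult hper hnn hinv b hib (by omega) hd)
      have hi'n : i + (j - i) / (j - k) * (j - k) < nn := by
        by_contra hge
        push_neg at hge
        have ha : i + (j - i) / (j - k) * (j - k) - nn <
            i + (j - i) / (j - k) * (j - k) := by omega
        have heqv : win g nn (i + (j - i) / (j - k) * (j - k) - nn) =
            win g nn (i + (j - i) / (j - k) * (j - k)) := by
          apply win_eq_of_agree
          intro t ht
          rw [show i + (j - i) / (j - k) * (j - k) + t =
            (i + (j - i) / (j - k) * (j - k) - nn + t) + nn by omega, hper]
        have h1 := hOI' _ ha
        rw [heqv, lexLt_irrefl] at h1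
        exact absurd h1 (by simp)
      exact ih _ i (by omega) hi'n hOI'
    · -- 2n exit: the skip lands at or past nn, the loop stops and returns i
      have hj2 : j = nn + nn := by
        rcases hexit with h | h
        · exact h
        · exact absurd h hgjk
      have hr : (j - i) % (j - k) ≤ nn := by
        by_cases hpn : j - k ≤ nn
        · omega
        · omega
      have hi'n : nn ≤ i + (j - i) / (j - k) * (j - k) := by omega
      rw [duvalOuterGo, dif_neg (by omega)]
      refine ⟨hi, hOI, ?_⟩
      intro b hib hbn
      rcases Nat.eq_or_lt_of_le hib with rfl | hib'
      · rw [lexLt_irrefl]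
      · by_cases hd : (b - i) % (j - k) = 0
        · have hx : (b - i) / (j - k) * (j - k) + (b - i) % (j - k) = b - i :=
            Nat.div_add_mod' (b - i) (j - k)
          have := exit_eqmult (nn := nn) hinv ((b - i) / (j - k)) b (by omega) (by omega)
          rw [this, lexLt_irrefl]
        · exact lexLt_asymm (exit_nonmult hper hnn hinv b hib' (by omega) hd)

-- ---- what the B-side fold (Python min) returns ----
def MinInv (l : List Char) (nn c m : Nat) : Prop :=
  m < c ∧ (∀ b, b < m → lexLt (duvalKey l nn m) (duvalKey l nn b) = true) ∧
    (∀ b, m ≤ b → b < c → lexLt (duvalKey l nn b) (duvalKey l nn m) = false)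

theorem duvalKey_length (l : List Char) (nn a : Nat) : (duvalKey l nn a).length = nn := by
  simp [duvalKey]

theorem lexLt_resolve {x y z : List Char} (hxy : lexLt x y = true) (hzy : lexLt z y = false)
    (hlen : z.length = x.length) : lexLt x z = true := by
  cases hxz : lexLt x z
  · cases hzx : lexLt z x
    · have : z = x := lexLt_connex z x hlen hzx hxz
      subst this
      rw [hxy] at hzy
      exact absurd hzy (by simp)
    · have := lexLt_trans z x y hzx hxy
      rw [this] at hzy
      exact absurd hzy (by simp)
  · rfl

theorem fold_min_spec (l : List Char) (nn : Nat) :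
    ∀ len c m, MinInv l nn c m →
    MinInv l nn (c + len)
      (List.foldl (fun m c => if lexLt (duvalKey l nn c) (duvalKey l nn m) then c else m) m
        (List.range' c len)) := by
  intro len
  induction len with
  | zero => intro c m h; simpa using h
  | succ len ih =>
    intro c m hP
    obtain ⟨hmc, h1, h2⟩ := hP
    rw [List.range'_succ, List.foldl_cons]
    have hnext : MinInv l nn (c + 1)
        (if lexLt (duvalKey l nn c) (duvalKey l nn m) then c else m) := by
      by_cases hc : lexLt (duvalKey l nn c) (duvalKey l nn m) = true
      · rw [if_pos hc]
        refine ⟨by omega, ?_, ?_⟩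
        · intro b hb
          rcases lt_trichotomy b m with hbm | rfl | hmb
          · exact lexLt_trans _ _ _ hc (h1 b hbm)
          · exact hc
          · exact lexLt_resolve hc (h2 b (by omega) (by omega))
              (by rw [duvalKey_length, duvalKey_length])
        · intro b hb1 hb2
          have : b = c := by omega
          subst this
          exact lexLt_irrefl _
      · rw [if_neg hc]
        refine ⟨by omega, h1, ?_⟩
        intro b hb1 hb2
        rcases Nat.lt_or_ge b c with hbc | hbc
        · exact h2 b hb1 hbc
        · have : b = c := by omega
          subst this
          exact eq_false_of_ne_true hc
    have := ih (c + 1) _ hnext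
    rw [show c + 1 + len = c + (len + 1) by omega] at this
    exact this

theorem duvalMin_spec (l : List Char) (nn : Nat) (hnn : 0 < nn) :
    MinInv l nn nn (duvalMin l nn) := by
  have h0 : MinInv l nn 1 0 := by
    refine ⟨by omega, by omega, ?_⟩
    intro b hb1 hb2
    have : b = 0 := by omega
    subst this
    exact lexLt_irrefl _
  have := fold_min_spec l nn (nn - 1) 1 0 h0
  rw [show 1 + (nn - 1) = nn by omega] at this
  exact this

-- duvalKey is the window of the modular-access character function
theorem key_eq_win (l : List Char) (nn a : Nat) :
    duvalKey l nn a = win (fun x => duvalGet l nn x) nn a := rfl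

-- ---- the two ports agree ----
theorem final_eq {g : Nat → Char} {nn x y : Nat} (hx : Final g nn x)
    (hy : y < nn ∧ (∀ b, b < y → lexLt (win g nn y) (win g nn b) = true) ∧
      (∀ b, y ≤ b → b < nn → lexLt (win g nn b) (win g nn y) = false)) : x = y := by
  obtain ⟨hxn, hx1, hx2⟩ := hx
  obtain ⟨hyn, hy1, hy2⟩ := hy
  rcases lt_trichotomy x y with h | h | h
  · have h1 := hy1 x h
    have h2 := hx2 y (by omega) hyn
    rw [h1] at h2
    exact absurd h2 (by simp)
  · exact h
  · have h1 := hx1 y h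
    have h2 := hy2 x (by omega) hxn
    rw [h1] at h2
    exact absurd h2 (by simp)

theorem duval_eq_alt (n : Int) (s : String) (hpre : Pre_duval n s) :
    duval n s = duval_alt n s := by
  obtain ⟨hn1, _⟩ := hpre
  rw [duval, duval_alt, if_pos hn1, if_pos hn1]
  have hnn : 0 < n.toNat := by omega
  have hper : ∀ x, duvalGet s.toList n.toNat (x + n.toNat) = duvalGet s.toList n.toNat x := by
    intro x
    unfold duvalGet
    rw [Nat.add_mod_right]
  have hA := outer_spec (fun x => duvalGet s.toList n.toNat x) n.toNat hper hnn n.toNat 0 0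
    (by omega) hnn (by omega)
  have hB := duvalMin_spec s.toList n.toNat hnn
  obtain ⟨hBn, hB1, hB2⟩ := hB
  have : duvalOuterGo (fun x => duvalGet s.toList n.toNat x) n.toNat 0 0 =
      duvalMin s.toList n.toNat := by
    apply final_eq hA
    refine ⟨hBn, ?_, ?_⟩
    · intro b hb
      rw [← key_eq_win, ← key_eq_win]
      exact hB1 b hb
    · intro b hb1 hb2
      rw [← key_eq_win, ← key_eq_win]
      exact hB2 b hb1 hb2
  rw [this]

-- ===== VERDICT (by name: the statement is the Claim_ definition above) =====
theorem duval_spec : Claim_equal_duval := by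
  intro n s _ hpre
  unfold Spec_duval
  exact duval_eq_alt n s hpre
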